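-- pv_equiv track=rewrite | github.com/kylemeador/symdesign | symdesign/sequence/__init__.py | pdb_to_pose_offset
-- ===== SOURCE A (Python) =====
-- from collections.abc import Iterable, Iterator, Sequence
-- from typing import Any, AnyStr, get_args, Literal, TypedDict
--
-- def pdb_to_pose_offset(reference_sequence: dict[Any, Sequence]) -> dict[Any, int]:
--     """Take a dictionary with chain name as keys and return the length of Pose numbering offset
--
--     Args:
--         reference_sequence: {key1: 'MSGKLDA...', ...} or {key2: {1: 'A', 2: 'S', ...}, ...}
--     Returns:
--         {key1: 0, key2: 123, ...}
--     """
--     offset = {}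
--     # prior_chain = None
--     prior_chains_len = prior_key = 0  # prior_key not used as 0 but to ensure initialized nonetheless
--     for idx, key in enumerate(reference_sequence):
--         if idx > 0:
--             prior_chains_len += len(reference_sequence[prior_key])
--         offset[key] = prior_chains_len
--         # insert function here? Make this a decorator!?
--         prior_key = key
--
--     return offset
-- ===== SOURCE B (Python) =====
-- def pdb_to_pose_offset(reference_sequence: dict) -> dict:
--     """Each key's offset is computed independently as the total length of all
--     values preceding it (a per-key scan over its predecessors, no accumulator)."""
--     keys = list(reference_sequence)
--     return {key: sum(len(reference_sequence[prior]) for prior in keys[:idx])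
--             for idx, key in enumerate(keys)}
-- ===== Notes on version B (the rewrite author's own statement) =====
-- stated objective: alternative
-- what changed: Replaces A's single-pass running sum with delayed prior-key bookkeeping by a per-key brute-force computation: each offset is independently the sum of the lengths of all predecessor values (a nested scan, no carried accumulator).
import Mathlib
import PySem

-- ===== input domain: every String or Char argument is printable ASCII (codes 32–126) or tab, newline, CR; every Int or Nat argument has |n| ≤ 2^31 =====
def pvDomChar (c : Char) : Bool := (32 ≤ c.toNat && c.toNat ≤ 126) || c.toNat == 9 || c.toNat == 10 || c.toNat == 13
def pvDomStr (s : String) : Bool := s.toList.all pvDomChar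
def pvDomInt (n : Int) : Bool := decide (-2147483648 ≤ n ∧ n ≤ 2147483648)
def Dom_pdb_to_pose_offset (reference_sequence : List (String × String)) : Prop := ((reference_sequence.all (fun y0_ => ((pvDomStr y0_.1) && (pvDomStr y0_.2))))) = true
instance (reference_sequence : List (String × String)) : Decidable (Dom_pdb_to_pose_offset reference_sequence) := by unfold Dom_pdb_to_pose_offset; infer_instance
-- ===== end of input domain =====

-- B drops A's running sum entirely: each key's offset is recomputed from scratch as the
-- sum of the lengths of all predecessor values (nested scan); objective: alternative.

-- ===== PORT A =====
-- state = (offset, prior_chains_len, prior_key); Python initialises prior_key = 0 (an int) and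
-- never reads it at idx 0, so the port uses "" as the (dead) initial prior_key.
def pdb_to_pose_offset (reference_sequence : List (String × String)) : List (String × Int) :=
  let d := PySem.Dict.ofList reference_sequence
  let fin := (PySem.List.enumerate d.keys 0).foldl
    (fun (st : PySem.Dict String Int × Int × String) p =>
      let pcl := if p.1 > 0 then st.2.1 + PySem.Str.len (d.getD st.2.2 "") else st.2.1
      (st.1.insert p.2 pcl, pcl, p.2))
    (PySem.Dict.empty, 0, "")
  fin.1.items

-- ===== PORT B =====
-- keys = list(d); {key: sum(len(d[prior]) for prior in keys[:idx]) for idx, key in enumerate(keys)}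
def pdb_to_pose_offset_alt (reference_sequence : List (String × String)) : List (String × Int) :=
  let d := PySem.Dict.ofList reference_sequence
  let keys := d.keys
  (PySem.Dict.ofList ((PySem.List.enumerate keys 0).map (fun p =>
    (p.2, ((PySem.List.slice keys none (some p.1)).map
            (fun prior => PySem.Str.len (d.getD prior ""))).foldl (· + ·) 0)))).items

-- ===== PRECONDITION & SPEC =====
def Spec_pdb_to_pose_offset (reference_sequence : List (String × String)) (out : List (String × Int)) : Prop := out = pdb_to_pose_offset_alt reference_sequence
instance (reference_sequence : List (String × String)) (out : List (String × Int)) : Decidable (Spec_pdb_to_pose_offset reference_sequence out) := by unfold Spec_pdb_to_pose_offset; infer_instance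

-- ===== CLAIM (what is proved, stated in full; the proofs are below) =====
def Claim_equal_pdb_to_pose_offset : Prop := ∀ (reference_sequence : List (String × String)), Dom_pdb_to_pose_offset reference_sequence → Spec_pdb_to_pose_offset reference_sequence (pdb_to_pose_offset reference_sequence)

-- ===== LEMMAS AND PROOFS =====

-- length of value at key k (proof-side abbreviation)
def flen (d : PySem.Dict String String) (k : String) : Int := PySem.Str.len (d.getD k "")

-- the intended offsets list: offs d ks s = offset for each key of ks, starting at s
def offs (d : PySem.Dict String String) : List String → Int → List Int
  | [], _ => []
  | k :: t, s => s :: offs d t (s + flen d k)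

theorem offs_length (d : PySem.Dict String String) (ks : List String) (s : Int) :
    (offs d ks s).length = ks.length := by
  induction ks generalizing s with
  | nil => rfl
  | cons k t ih => simp [offs, ih]

theorem offs_getElem (d : PySem.Dict String String) (ks : List String) (s : Int)
    (j : Nat) (h : j < (offs d ks s).length) :
    (offs d ks s)[j] = s + ((ks.take j).map (flen d)).foldl (· + ·) 0 := by
  induction ks generalizing s j with
  | nil => simp [offs_length] at h
  | cons k t ih =>
    cases j with
    | zero => simp [offs]
    | succ j' =>
      have h' : j' < (offs d t (s + flen d k)).length := by
        simpa [offs, offs_length] using h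
      have := ih (s + flen d k) j' h'
      have hshift : ∀ (l : List Int) (a : Int), l.foldl (· + ·) a = a + l.foldl (· + ·) 0 := by
        intro l
        induction l with
        | nil => simp
        | cons x xs ihl => intro a; simp only [List.foldl_cons]; rw [ihl, ihl (0 + x)]; ring
      simp only [offs, List.getElem_cons_succ, this, List.take_succ_cons, List.map_cons,
        List.foldl_cons]
      rw [hshift (List.map (flen d) (List.take j' t)) (0 + flen d k)]
      ring

-- A's tail loop (all indices ≥ 1, so the branch always adds the prior length)
theorem loopA_items (d : PySem.Dict String String) (ks : List String) (i : Int) (hi : 1 ≤ i)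
    (offset : PySem.Dict String Int) (pcl : Int) (prior : String)
    (hfresh : ∀ k ∈ ks, offset.contains k = false) (hnd : ks.Nodup) :
    ((PySem.List.enumerate ks i).foldl
      (fun (st : PySem.Dict String Int × Int × String) p =>
        let pcl := if p.1 > 0 then st.2.1 + PySem.Str.len (d.getD st.2.2 "") else st.2.1
        (st.1.insert p.2 pcl, pcl, p.2))
      (offset, pcl, prior)).1.items
    = offset.items ++ ks.zip (offs d ks (pcl + flen d prior)) := by
  induction ks generalizing i offset pcl prior with
  | nil => simp [PySem.List.enumerate]
  | cons k t ih =>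
    rw [PySem.List.enumerate_cons]
    simp only [List.foldl_cons]
    have hpos : (i > 0) = True := by simp; omega
    simp only [hpos, if_true]
    rw [ih (i + 1) (by omega)
        (offset.insert k (pcl + PySem.Str.len (d.getD prior "")))
        (pcl + PySem.Str.len (d.getD prior "")) k
        (by
          intro k' hk'
          rw [PySem.Dict.contains_insert]
          have hne : k' ≠ k := by
            rcases List.nodup_cons.mp hnd with ⟨hkn, _⟩
            intro h; exact hkn (h ▸ hk')
          simp [hne, hfresh k' (List.mem_cons_of_mem _ hk')])
        (List.nodup_cons.mp hnd).2]
    rw [PySem.Dict.items_insert_of_not_contains _ _ (hfresh k List.mem_cons_self)]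
    simp [offs, flen, List.append_assoc]

-- B's comprehension list is the zip of the keys with the intended offsets
theorem listB_eq_zip (d : PySem.Dict String String) (ks : List String) :
    (PySem.List.enumerate ks 0).map (fun p =>
      (p.2, ((PySem.List.slice ks none (some p.1)).map
              (fun prior => PySem.Str.len (d.getD prior ""))).foldl (· + ·) 0))
    = ks.zip (offs d ks 0) := by
  apply List.ext_getElem?
  intro j
  by_cases hj : j < ks.length
  · have hzlen : j < (ks.zip (offs d ks 0)).length := by
      simp [List.length_zip, offs_length]; omega
    rw [List.getElem?_map, PySem.List.getElem?_enumerate,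
        List.getElem?_eq_getElem hj, List.getElem?_eq_getElem hzlen, List.getElem_zip]
    simp only [Option.map_some]
    have hsl : PySem.List.slice ks none (some ((0 : Int) + (j : Nat))) = ks.take j := by
      rw [zero_add, PySem.List.slice_to_natCast]
    rw [hsl, offs_getElem d ks 0 j (by simp [offs_length]; omega), zero_add]
    rfl
  · have h1 : ks[j]? = none := List.getElem?_eq_none (by omega)
    rw [List.getElem?_map, PySem.List.getElem?_enumerate, h1]
    symm
    apply List.getElem?_eq_none
    simp [List.length_zip, offs_length]; omega

-- dict(zip) over nodup keys is the zip itself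
theorem ofList_items_of_nodup (l : List (String × Int)) (h : (l.map Prod.fst).Nodup) :
    (PySem.Dict.ofList l).items = l := by
  have := PySem.Dict.items_foldl_insert_fresh l Prod.fst Prod.snd PySem.Dict.empty
    (by intro a _; exact PySem.Dict.contains_empty _) h
  simpa [PySem.Dict.ofList, PySem.Dict.update] using this

-- ===== VERDICT (by name: the statement is the Claim_ definition above) =====
theorem pdb_to_pose_offset_spec : Claim_equal_pdb_to_pose_offset := by
  intro rs _
  unfold Spec_pdb_to_pose_offset pdb_to_pose_offset pdb_to_pose_offset_alt
  set d := PySem.Dict.ofList rs with hd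
  have hnd : d.keys.Nodup := PySem.Dict.nodup_keys_ofList rs
  -- A side
  have hA : (PySem.List.enumerate d.keys 0).foldl
      (fun (st : PySem.Dict String Int × Int × String) p =>
        let pcl := if p.1 > 0 then st.2.1 + PySem.Str.len (d.getD st.2.2 "") else st.2.1
        (st.1.insert p.2 pcl, pcl, p.2))
      (PySem.Dict.empty, 0, "")
      |>.1.items = d.keys.zip (offs d d.keys 0) := by
    cases hk : d.keys with
    | nil => rfl
    | cons k t =>
      rw [PySem.List.enumerate_cons, List.foldl_cons]
      have hndk := hk ▸ hnd
      have hstep := loopA_items d t (0 + 1) (by omega)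
          (PySem.Dict.empty.insert k 0) 0 k
          (by
            intro k' hk'
            rw [PySem.Dict.contains_insert]
            have hne : k' ≠ k := by
              rcases List.nodup_cons.mp hndk with ⟨hkn, _⟩
              intro h; exact hkn (h ▸ hk')
            simp [hne])
          (List.nodup_cons.mp hndk).2
      refine Eq.trans ?_ (hstep.trans ?_)
      · rfl
      · rw [PySem.Dict.items_insert_of_not_contains _ _ (by rfl)]
        simp [offs, flen, PySem.Dict.empty]
  -- B side
  rw [hA]
  show d.keys.zip (offs d d.keys 0) =
    (PySem.Dict.ofList ((PySem.List.enumerate d.keys 0).map (fun p =>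
      (p.2, ((PySem.List.slice d.keys none (some p.1)).map
              (fun prior => PySem.Str.len (d.getD prior ""))).foldl (· + ·) 0)))).items
  rw [listB_eq_zip]
  rw [ofList_items_of_nodup]
  have hlen : d.keys.length ≤ (offs d d.keys 0).length := by simp [offs_length]
  rw [List.map_fst_zip hlen]
  exact hnd
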